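-- pv_equiv track=rewrite | github.com/2226171237/Algorithmpractice | 机试/专业面试.py | getLeastCnt
-- ===== SOURCE A (Python) =====
-- def getEndwithDelCnt(s,p):
--     '''
--     至少删除多少字符才能使p成为s的后缀
--     :param s:
--     :param p:
--     :return:
--     '''
--     cnt=0
--     i=len(s)-1
--     j = len(p) - 1
--     while i>=0 and j>=0:
--         if s[i]==p[j]:
--             i-=1
--             j-=1
--         else:
--             i-=1
--             cnt+=1
--     return 2**31 if j>=0 else cnt
--
-- def getLeastCnt(s,p):
--     lenS=len(s)
--     lenP=len(p)
--     # P[i,j] 表示为p_j 为s_i的子串，s_i至少要删除多少个字符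
--     P=[[2**31 for _ in range(lenP)] for _ in range(lenS)]
--     # 第一列初始化，p_0 在s中 则不删除=0，否则不成功=2**31
--     if p[0] in s:
--         i=0
--         while i<lenS:
--             if s[i]==p[0]:
--                 break
--             i+=1
--         for ii in range(i,lenS):
--             P[ii][0]=0
--     # 第一列初始化全为2**31
--     for i in range(1,lenS):
--         for j in range(1,lenP):
--             if s[i]==p[j]:
--                 del_cnt=getEndwithDelCnt(s[:i],p[:j])
--                 P[i][j]=min(P[i-1][j],del_cnt)
--             else:
--                 P[i][j]=P[i-1][j]
--     return -1 if P[-1][-1]==2**31 else P[-1][-1]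
-- ===== SOURCE B (Python) =====
-- def getLeastCnt(s, p):
--     n, m = len(s), len(p)
--     INF = 2 ** 31
--     if m == 1:
--         return 0 if p[0] in s else -1
--     # prev[j] = deletions needed so that p[:j] is a greedy (backward) suffix match
--     # of s[:i]; None = impossible.  One O(n*m) DP instead of recomputing the
--     # backward scan for every cell.
--     prev = [0] + [None] * (m - 1)          # row i = 0
--     best = INF
--     for i in range(1, n):
--         cur = [0] * m
--         for j in range(1, m):
--             if s[i - 1] == p[j - 1]:
--                 cur[j] = prev[j - 1]
--             else:
--                 cur[j] = None if prev[j] is None else prev[j] + 1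
--         if s[i] == p[m - 1] and cur[m - 1] is not None and cur[m - 1] < best:
--             best = cur[m - 1]
--         prev = cur
--     return -1 if best == INF else best
-- ===== Notes on version B (the rewrite author's own statement) =====
-- stated objective: faster
-- what changed: Instead of rebuilding the full lenS x lenP table and re-running the O(lenS) backward greedy scan (getEndwithDelCnt) for every matching cell, B fills one DP row per position with the backward-greedy recurrence f[i][j] = f[i-1][j-1] on match / f[i-1][j]+1 on mismatch and keeps a running minimum over the last column, so each cell costs O(1).
import Mathlib
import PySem

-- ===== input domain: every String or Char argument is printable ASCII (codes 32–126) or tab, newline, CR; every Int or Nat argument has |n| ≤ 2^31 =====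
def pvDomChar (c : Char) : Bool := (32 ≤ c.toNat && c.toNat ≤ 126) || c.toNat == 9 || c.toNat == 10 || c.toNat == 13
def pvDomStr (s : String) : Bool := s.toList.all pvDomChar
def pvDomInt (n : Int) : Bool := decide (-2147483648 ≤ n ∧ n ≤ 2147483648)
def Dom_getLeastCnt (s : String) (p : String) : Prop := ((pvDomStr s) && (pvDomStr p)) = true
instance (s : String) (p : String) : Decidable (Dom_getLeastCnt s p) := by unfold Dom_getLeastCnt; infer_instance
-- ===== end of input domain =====

-- B replaces A's per-cell O(lenS) backward greedy rescans by one O(lenS*lenP) row DP (same return value).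

-- ===== PORT A =====
-- the while-loop of getEndwithDelCnt: state (i, j, cnt), i strictly decreases, fuel = len(s)+1 suffices.
-- s[i] / p[j] are always in range when the loop body runs, so pyGetD's default is unreachable.
def pvGedLoop (s p : List Char) : Nat → Int → Int → Int → Int × Int
  | 0, _, j, cnt => (j, cnt)
  | Nat.succ f, i, j, cnt =>
    if 0 ≤ i ∧ 0 ≤ j then
      if PySem.List.pyGetD s i ' ' = PySem.List.pyGetD p j ' ' then
        pvGedLoop s p f (i - 1) (j - 1) cnt
      else
        pvGedLoop s p f (i - 1) j (cnt + 1)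
    else (j, cnt)

def getEndwithDelCnt (s p : List Char) : Int :=
  let r := pvGedLoop s p (s.length + 1) ((s.length : Int) - 1) ((p.length : Int) - 1) 0
  if 0 ≤ r.1 then 2 ^ 31 else r.2

-- the 'i = 0; while i < lenS: if s[i] == p[0]: break; i += 1' scan (returns lenS if absent)
def pvFindFirst (s : List Char) (c : Char) : Nat :=
  match s with
  | [] => 0
  | x :: xs => if x = c then 0 else pvFindFirst xs c + 1

def getLeastCnt (s : String) (p : String) : Int :=
  let S := s.toList
  let Pc := p.toList
  let lenS := S.length
  let lenP := Pc.length
  let P0 : List (List Int) := (List.range lenS).map (fun _ => (List.range lenP).map (fun _ => (2 : Int) ^ 31))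
  let P1 : List (List Int) :=
    match Pc.head? with
    | none => P0      -- p[0] raises IndexError in Python here (p = ""): excluded by Pre_
    | some c0 =>
      if S.contains c0 then   -- 'p[0] in s' (a length-1 needle: substring test = char membership)
        let i := pvFindFirst S c0
        (PySem.List.pyRange (i : Int) (lenS : Int) 1).foldl
          (fun t ii => PySem.List.pySetD t ii (PySem.List.pySetD (PySem.List.pyGetD t ii []) 0 0)) P0
      else P0
  let P2 : List (List Int) :=
    (PySem.List.pyRange 1 (lenS : Int) 1).foldl (fun t i =>
      (PySem.List.pyRange 1 (lenP : Int) 1).foldl (fun t j =>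
        let v : Int :=
          if PySem.List.pyGetD S i ' ' = PySem.List.pyGetD Pc j ' ' then
            min (PySem.List.pyGetD (PySem.List.pyGetD t (i - 1) []) j 0)
                (getEndwithDelCnt (PySem.List.slice S none (some i)) (PySem.List.slice Pc none (some j)))
          else PySem.List.pyGetD (PySem.List.pyGetD t (i - 1) []) j 0
        PySem.List.pySetD t i (PySem.List.pySetD (PySem.List.pyGetD t i []) j v)) t) P1
  -- P[-1][-1]; out of range means Python raised IndexError (s = ""): excluded by Pre_
  let last := PySem.List.pyGetD (PySem.List.pyGetD P2 (-1) []) (-1) 0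
  if last = 2 ^ 31 then -1 else last

-- ===== PORT B =====
def getLeastCnt_alt (s : String) (p : String) : Int :=
  let S := s.toList
  let Pc := p.toList
  let n := S.length
  let m := Pc.length
  if m = 1 then (if S.contains (Pc.getD 0 ' ') then 0 else -1)
  else
    -- prev/cur : row of the backward-greedy deletion DP; none = impossible (Source B's None)
    let prev0 : List (Option Int) := some 0 :: List.replicate (m - 1) none
    let st :=
      (PySem.List.pyRange 1 (n : Int) 1).foldl
        (fun (st : List (Option Int) × Int) i =>
          let prev := st.1
          let best := st.2
          -- 'cur = [0]*m; for j in range(1, m): cur[j] = …' built left to right (jj = j - 1)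
          let cur : List (Option Int) :=
            some 0 :: (List.range (m - 1)).map (fun jj =>
              if PySem.List.pyGetD S (i - 1) ' ' = Pc.getD jj ' ' then prev.getD jj none
              else (prev.getD (jj + 1) none).map (· + 1))
          let best' :=
            if PySem.List.pyGetD S i ' ' = Pc.getD (m - 1) ' ' then
              match cur.getD (m - 1) none with
              | some v => if v < best then v else best
              | none => best
            else best
          (cur, best'))
        (prev0, (2 : Int) ^ 31)
    if st.2 = 2 ^ 31 then -1 else st.2

-- ===== PRECONDITION & SPEC =====
-- Pre_ excludes exactly the inputs on which the Python A raises IndexError: empty s (P[-1]) or empty p (p[0]).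
def Pre_getLeastCnt (s : String) (p : String) : Prop := s.toList ≠ [] ∧ p.toList ≠ []
instance (s : String) (p : String) : Decidable (Pre_getLeastCnt s p) := by unfold Pre_getLeastCnt; infer_instance
def pvWitness_getLeastCnt : String × String := ("aabca", "abc")

def Spec_getLeastCnt (s : String) (p : String) (out : Int) : Prop := out = getLeastCnt_alt s p
instance (s : String) (p : String) (out : Int) : Decidable (Spec_getLeastCnt s p out) := by unfold Spec_getLeastCnt; infer_instance

-- ===== CLAIM (what is proved, stated in full; the proofs are below) =====
def Claim_equal_getLeastCnt : Prop := ∀ (s : String) (p : String), Dom_getLeastCnt s p → Pre_getLeastCnt s p → Spec_getLeastCnt s p (getLeastCnt s p)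

-- ===== LEMMAS AND PROOFS =====

-- the mathematical backward greedy: Ffun S P i j = deletions so that P[:j] greedily suffix-matches S[:i] (none = fail)
def Ffun (S Pc : List Char) : Nat → Nat → Option Int
  | _, 0 => some 0
  | 0, Nat.succ _ => none
  | Nat.succ i, Nat.succ j =>
    if S.getD i ' ' = Pc.getD j ' ' then Ffun S Pc i j
    else (Ffun S Pc i (j + 1)).map (· + 1)

-- final value of column lenP-1 of A's table at row i (and B's running best after row i)
def Tlast (S Pc : List Char) : Nat → Int
  | 0 => 2 ^ 31
  | Nat.succ i =>
    if S.getD (i + 1) ' ' = Pc.getD (Pc.length - 1) ' ' then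
      min (Tlast S Pc i) ((Ffun S Pc (i + 1) (Pc.length - 1)).getD (2 ^ 31))
    else Tlast S Pc i




-- getD of set, in the convenient if-form
theorem pv_getD_set {α : Type} (xs : List α) (i j : Nat) (v : α) (d : α) :
    (xs.set i v).getD j d = if i = j ∧ i < xs.length then v else xs.getD j d := by
  simp [List.getD_eq_getElem?_getD, List.getElem?_set]
  split_ifs <;> simp_all <;> omega

-- Ffun only looks at the first i / j characters
theorem pv_Ffun_take (S Pc : List Char) (a b : Nat) :
    ∀ (i : Nat), ∀ (j : Nat), i ≤ a → j ≤ b → Ffun (S.take a) (Pc.take b) i j = Ffun S Pc i j := by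
  intro i
  induction i with
  | zero => intro j _ _; cases j <;> simp [Ffun]
  | succ i ih =>
    intro j hia hjb
    cases j with
    | zero => simp [Ffun]
    | succ j =>
      have h1 : (S.take a).getD i ' ' = S.getD i ' ' := by
        simp [List.getD_eq_getElem?_getD, show i < a by omega]
      have h2 : (Pc.take b).getD j ' ' = Pc.getD j ' ' := by
        simp [List.getD_eq_getElem?_getD, show j < b by omega]
      simp only [Ffun, h1, h2]
      rw [ih j (by omega) (by omega), ih (j+1) (by omega) (by omega)]

-- the loop exits as soon as an index is negative
theorem pvGedLoop_stop (S Pc : List Char) (fuel : Nat) (I J : Int) (c : Int)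
    (h : I < 0 ∨ J < 0) : pvGedLoop S Pc fuel I J c = (J, c) := by
  cases fuel with
  | zero => simp [pvGedLoop]
  | succ f => simp only [pvGedLoop]; rw [if_neg (by omega)]

-- the while loop of getEndwithDelCnt computes Ffun
theorem pv_ged_loop (S Pc : List Char) :
    ∀ (i : Nat), ∀ (j : Nat) (fuel : Nat) (c : Int), i ≤ S.length → j ≤ Pc.length → i ≤ fuel →
    (match Ffun S Pc i j with
     | some d => pvGedLoop S Pc fuel ((i : Int) - 1) ((j : Int) - 1) c = (-1, c + d)
     | none => 0 ≤ (pvGedLoop S Pc fuel ((i : Int) - 1) ((j : Int) - 1) c).1) := by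
  intro i
  induction i with
  | zero =>
    intro j fuel c _ _ _
    have hstop := pvGedLoop_stop S Pc fuel (((0:Nat) : Int) - 1) (((j:Nat) : Int) - 1) c (by left; norm_num)
    cases j with
    | zero => simp only [Ffun]; rw [hstop]; norm_num
    | succ j => simp only [Ffun]; rw [hstop]; simp
  | succ i ih =>
    intro j fuel c hi hj hfuel
    obtain ⟨f, rfl⟩ : ∃ f, fuel = f + 1 := ⟨fuel - 1, by omega⟩
    cases j with
    | zero =>
      have hstop := pvGedLoop_stop S Pc (f+1) (((i+1:Nat) : Int) - 1) (((0:Nat) : Int) - 1) c (by right; norm_num)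
      simp only [Ffun]; rw [hstop]; norm_num
    | succ j =>
      have hi' : ((i+1 : Nat) : Int) - 1 = ((i : Nat) : Int) := by push_cast; ring
      have hj' : ((j+1 : Nat) : Int) - 1 = ((j : Nat) : Int) := by push_cast; ring
      rw [hi', hj']
      have hunf : pvGedLoop S Pc (f+1) ((i:Nat):Int) ((j:Nat):Int) c
          = if S.getD i ' ' = Pc.getD j ' '
            then pvGedLoop S Pc f (((i:Nat):Int) - 1) (((j:Nat):Int) - 1) c
            else pvGedLoop S Pc f (((i:Nat):Int) - 1) ((j:Nat):Int) (c+1) := by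
        simp only [pvGedLoop]
        rw [if_pos (by constructor <;> positivity)]
        simp only [PySem.List.pyGetD_natCast]
      by_cases heq : S.getD i ' ' = Pc.getD j ' '
      · rw [if_pos heq] at hunf
        have := ih j f c (by omega) (by omega) (by omega)
        simp only [Ffun, if_pos heq, hunf]
        exact this
      · rw [if_neg heq] at hunf
        have := ih (j+1) f (c+1) (by omega) (by omega) (by omega)
        rw [hj'] at this
        simp only [Ffun, if_neg heq, hunf]
        cases hF : Ffun S Pc i (j+1) with
        | some d => rw [hF] at this; simp only [Option.map_some]; rw [this]; congr 1; ring
        | none => rw [hF] at this; simpa using this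

-- A's helper on prefixes computes Ffun (with 2^31 as failure sentinel)
theorem pv_g_eq (S Pc : List Char) (i j : Nat) (hi : i ≤ S.length) (hj : j ≤ Pc.length) :
    getEndwithDelCnt (S.take i) (Pc.take j) = (Ffun S Pc i j).getD (2 ^ 31) := by
  have hlen1 : (S.take i).length = i := by simp; omega
  have hlen2 : (Pc.take j).length = j := by simp; omega
  have hloop := pv_ged_loop (S.take i) (Pc.take j) i j ((S.take i).length + 1) 0
      (by omega) (by omega) (by omega)
  have htake := pv_Ffun_take S Pc i j i j (le_refl i) (le_refl j)
  rw [htake] at hloop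
  simp only [getEndwithDelCnt, hlen1, hlen2]
  rw [hlen1] at hloop
  cases hF : Ffun S Pc i j with
  | some d =>
    rw [hF] at hloop; simp only at hloop
    rw [hloop]; norm_num
  | none =>
    rw [hF] at hloop; simp only at hloop
    simp only [Option.getD_none]
    rw [if_pos hloop]

-- Tlast never exceeds the sentinel
theorem pv_Tlast_le (S Pc : List Char) (i : Nat) : Tlast S Pc i ≤ 2 ^ 31 := by
  induction i with
  | zero => simp [Tlast]
  | succ i ih =>
    simp only [Tlast]
    split_ifs
    · exact le_trans (min_le_left _ _) ih
    · exact ih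

-- the break-scan finds an index below the length when the character occurs
theorem pv_findFirst_lt (S : List Char) (c : Char) (h : S.contains c) : pvFindFirst S c < S.length := by
  induction S with
  | nil => simp at h
  | cons x xs ih =>
    by_cases hx : x = c
    · simp [pvFindFirst, hx]
    · simp only [pvFindFirst, if_neg hx, List.length_cons]
      have hmem : c ∈ x :: xs := by simpa using h
      have : xs.contains c := by
        rcases List.mem_cons.1 hmem with h1 | h1
        · exact absurd h1.symm hx
        · simpa using h1
      exact Nat.succ_lt_succ (ih this)

-- B's initial row is row 0 of Ffun
theorem pv_row0 (S Pc : List Char) (hm : 1 ≤ Pc.length) :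
    (some 0 :: List.replicate (Pc.length - 1) none : List (Option Int))
      = (List.range Pc.length).map (fun j => Ffun S Pc 0 j) := by
  apply List.ext_getElem
  · simp; omega
  · intro n h1 h2
    cases n with
    | zero => simp [Ffun]
    | succ n =>
      simp only [List.getElem_cons_succ, List.getElem_replicate, List.getElem_map,
        List.getElem_range]
      simp [Ffun]

-- B's row update builds row i+1 of Ffun from row i
theorem pv_rowstep (S Pc : List Char) (i : Nat) (hm : 1 ≤ Pc.length) :
    (some 0 :: (List.range (Pc.length - 1)).map (fun jj =>
        if S.getD i ' ' = Pc.getD jj ' '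
        then ((List.range Pc.length).map (fun j => Ffun S Pc i j)).getD jj none
        else (((List.range Pc.length).map (fun j => Ffun S Pc i j)).getD (jj + 1) none).map (· + 1))
      : List (Option Int))
      = (List.range Pc.length).map (fun j => Ffun S Pc (i + 1) j) := by
  apply List.ext_getElem
  · simp; omega
  · intro n h1 h2
    cases n with
    | zero => simp [Ffun]
    | succ n =>
      simp only [List.getElem_cons_succ, List.getElem_map, List.getElem_range]
      have hn : n < Pc.length - 1 := by simp at h1; omega
      have g1 : ((List.range Pc.length).map (fun j => Ffun S Pc i j)).getD n none = Ffun S Pc i n :=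
        PySem.List.getD_map_range _ _ _ _ (by omega)
      have g2 : ((List.range Pc.length).map (fun j => Ffun S Pc i j)).getD (n+1) none
          = Ffun S Pc i (n+1) :=
        PySem.List.getD_map_range _ _ _ _ (by omega)
      simp only [g1, g2]
      simp [Ffun]

-- B's fold carries (row of Ffun, running best = Tlast)
theorem pv_b_fold (S Pc : List Char) (hm : 1 ≤ Pc.length) :
    ∀ (k : Nat), 1 ≤ k →
    (PySem.List.pyRange 1 (k : Int) 1).foldl
      (fun (st : List (Option Int) × Int) i =>
        let prev := st.1
        let best := st.2
        let cur : List (Option Int) :=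
          some 0 :: (List.range (Pc.length - 1)).map (fun jj =>
            if PySem.List.pyGetD S (i - 1) ' ' = Pc.getD jj ' ' then prev.getD jj none
            else (prev.getD (jj + 1) none).map (· + 1))
        let best' :=
          if PySem.List.pyGetD S i ' ' = Pc.getD (Pc.length - 1) ' ' then
            match cur.getD (Pc.length - 1) none with
            | some v => if v < best then v else best
            | none => best
          else best
        (cur, best'))
      (some 0 :: List.replicate (Pc.length - 1) none, (2 : Int) ^ 31)
    = ((List.range Pc.length).map (fun j => Ffun S Pc (k - 1) j), Tlast S Pc (k - 1)) := by
  intro k hk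
  induction k, hk using Nat.le_induction with
  | base =>
    rw [PySem.List.pyRange_one_eq_nil (by norm_num)]
    simp only [List.foldl_nil]
    rw [pv_row0 S Pc hm]
    rfl
  | succ k hk ih =>
    have hcast : ((k + 1 : Nat) : Int) = (k : Int) + 1 := by push_cast; ring
    rw [hcast, PySem.List.pyRange_one_succ_right (by exact_mod_cast hk)]
    rw [List.foldl_append, ih]
    simp only [List.foldl_cons, List.foldl_nil]
    have hk1 : (k : Int) - 1 = ((k - 1 : Nat) : Int) := by push_cast [hk]; ring
    have hget1 : PySem.List.pyGetD S ((k : Int) - 1) ' ' = S.getD (k - 1) ' ' := by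
      rw [hk1, PySem.List.pyGetD_natCast]
    have hget2 : PySem.List.pyGetD S ((k : Nat) : Int) ' ' = S.getD k ' ' := by
      rw [PySem.List.pyGetD_natCast]
    simp only [hget1, hget2]
    have hcur := pv_rowstep S Pc (k - 1) hm
    rw [show (k - 1) + 1 = k from by omega] at hcur
    rw [hcur]
    have hlast : ((List.range Pc.length).map (fun j => Ffun S Pc k j)).getD (Pc.length - 1) none
        = Ffun S Pc k (Pc.length - 1) :=
      PySem.List.getD_map_range _ _ _ _ (by omega)
    rw [hlast]
    congr 1
    rw [show k + 1 - 1 = (k - 1) + 1 from by omega]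
    simp only [Tlast]
    rw [show (k - 1) + 1 = k from by omega]
    by_cases hc : S.getD k ' ' = Pc.getD (Pc.length - 1) ' '
    · rw [if_pos hc, if_pos hc]
      cases hF : Ffun S Pc k (Pc.length - 1) with
      | some v =>
        simp only [Option.getD_some]
        rw [min_def]
        split_ifs <;> omega
      | none =>
        simp only [Option.getD_none]
        exact (min_eq_left (pv_Tlast_le S Pc (k - 1))).symm
    · rw [if_neg hc, if_neg hc]

-- pySetD on an empty row is the identity
theorem pv_pySetD_nil : PySem.List.pySetD ([] : List Int) 0 0 = [] := by
  simp [PySem.List.pySetD, PySem.List.pySet?]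
  cases h : PySem.List.pyIdx? 0 0 <;> simp

-- the first-column initialisation fold sets entry 0 of rows a..a+k-1
theorem pv_col0_fold (k : Nat) : ∀ (a : Nat) (t : List (List Int)),
    (((PySem.List.pyRange (a : Int) ((a + k : Nat) : Int) 1).foldl
        (fun t ii => PySem.List.pySetD t ii (PySem.List.pySetD (PySem.List.pyGetD t ii []) 0 0)) t).length
      = t.length) ∧
    (∀ r : Nat, ((PySem.List.pyRange (a : Int) ((a + k : Nat) : Int) 1).foldl
        (fun t ii => PySem.List.pySetD t ii (PySem.List.pySetD (PySem.List.pyGetD t ii []) 0 0)) t).getD r []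
      = if a ≤ r ∧ r < a + k then PySem.List.pySetD (t.getD r []) 0 0 else t.getD r []) := by
  induction k with
  | zero =>
    intro a t
    rw [PySem.List.pyRange_one_eq_nil (by push_cast; omega)]
    simp only [List.foldl_nil]
    constructor
    · trivial
    · intro r
      rw [if_neg (by omega)]
  | succ k ih =>
    intro a t
    rw [PySem.List.pyRange_one_cons (by push_cast; omega), List.foldl_cons]
    have e1 : PySem.List.pySetD t (a : Int) (PySem.List.pySetD (PySem.List.pyGetD t (a : Int) []) 0 0)
        = t.set a (PySem.List.pySetD (t.getD a []) 0 0) := by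
      simp
    have e2 : ((a : Int) + 1) = ((a + 1 : Nat) : Int) := by push_cast; ring
    have e3 : ((a + (k+1) : Nat) : Int) = (((a + 1) + k : Nat) : Int) := by push_cast; ring
    rw [e1, e2, e3]
    obtain ⟨ihl, ihg⟩ := ih (a + 1) (t.set a (PySem.List.pySetD (t.getD a []) 0 0))
    constructor
    · rw [ihl]; simp
    · intro r
      rw [ihg r, pv_getD_set]
      by_cases h1 : a + 1 ≤ r ∧ r < a + 1 + k
      · rw [if_pos h1, if_neg (by omega), if_pos (by omega)]
      · rw [if_neg h1]
        by_cases h2 : a = r ∧ a < t.length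
        · rw [if_pos h2, if_pos (by omega)]
          rw [h2.1]
        · rw [if_neg h2]
          by_cases h3 : a ≤ r ∧ r < a + (k + 1)
          · rw [if_pos h3]
            have hra : r = a := by omega
            subst hra
            have hlen : t.length ≤ r := by
              by_contra hc
              exact h2 ⟨rfl, by omega⟩
            rw [List.getD_eq_default _ _ (by omega), pv_pySetD_nil]
          · rw [if_neg h3]

-- one row of A's double loop: only row i changes, and its last column receives the recurrence value
theorem pv_inner_fold (S Pc : List Char) (i : Nat) (hi : 1 ≤ i) :
    ∀ (k a : Nat) (t : List (List Int)), 1 ≤ a → a + k = Pc.length →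
    i < t.length → (t.getD i []).length = Pc.length →
    (((PySem.List.pyRange (a : Int) ((Pc.length : Nat) : Int) 1).foldl
        (fun t j =>
          PySem.List.pySetD t (i : Int) (PySem.List.pySetD (PySem.List.pyGetD t (i : Int) []) j
            (if PySem.List.pyGetD S (i : Int) ' ' = PySem.List.pyGetD Pc j ' ' then
              min (PySem.List.pyGetD (PySem.List.pyGetD t ((i : Int) - 1) []) j 0)
                  (getEndwithDelCnt (PySem.List.slice S none (some (i : Int))) (PySem.List.slice Pc none (some j)))
            else PySem.List.pyGetD (PySem.List.pyGetD t ((i : Int) - 1) []) j 0))) t).length = t.length) ∧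
    (∀ r : Nat, r ≠ i → ((PySem.List.pyRange (a : Int) ((Pc.length : Nat) : Int) 1).foldl
        (fun t j =>
          PySem.List.pySetD t (i : Int) (PySem.List.pySetD (PySem.List.pyGetD t (i : Int) []) j
            (if PySem.List.pyGetD S (i : Int) ' ' = PySem.List.pyGetD Pc j ' ' then
              min (PySem.List.pyGetD (PySem.List.pyGetD t ((i : Int) - 1) []) j 0)
                  (getEndwithDelCnt (PySem.List.slice S none (some (i : Int))) (PySem.List.slice Pc none (some j)))
            else PySem.List.pyGetD (PySem.List.pyGetD t ((i : Int) - 1) []) j 0))) t).getD r [] = t.getD r []) ∧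
    ((((PySem.List.pyRange (a : Int) ((Pc.length : Nat) : Int) 1).foldl
        (fun t j =>
          PySem.List.pySetD t (i : Int) (PySem.List.pySetD (PySem.List.pyGetD t (i : Int) []) j
            (if PySem.List.pyGetD S (i : Int) ' ' = PySem.List.pyGetD Pc j ' ' then
              min (PySem.List.pyGetD (PySem.List.pyGetD t ((i : Int) - 1) []) j 0)
                  (getEndwithDelCnt (PySem.List.slice S none (some (i : Int))) (PySem.List.slice Pc none (some j)))
            else PySem.List.pyGetD (PySem.List.pyGetD t ((i : Int) - 1) []) j 0))) t).getD i []).length = Pc.length) ∧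
    (a ≤ Pc.length - 1 →
      (((PySem.List.pyRange (a : Int) ((Pc.length : Nat) : Int) 1).foldl
        (fun t j =>
          PySem.List.pySetD t (i : Int) (PySem.List.pySetD (PySem.List.pyGetD t (i : Int) []) j
            (if PySem.List.pyGetD S (i : Int) ' ' = PySem.List.pyGetD Pc j ' ' then
              min (PySem.List.pyGetD (PySem.List.pyGetD t ((i : Int) - 1) []) j 0)
                  (getEndwithDelCnt (PySem.List.slice S none (some (i : Int))) (PySem.List.slice Pc none (some j)))
            else PySem.List.pyGetD (PySem.List.pyGetD t ((i : Int) - 1) []) j 0))) t).getD i []).getD (Pc.length - 1) 0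
        = if S.getD i ' ' = Pc.getD (Pc.length - 1) ' '
          then min ((t.getD (i - 1) []).getD (Pc.length - 1) 0)
                   (getEndwithDelCnt (S.take i) (Pc.take (Pc.length - 1)))
          else (t.getD (i - 1) []).getD (Pc.length - 1) 0) := by
  intro k
  induction k with
  | zero =>
    intro a t ha hak hit hrow
    have hnil : PySem.List.pyRange (a : Int) ((Pc.length : Nat) : Int) 1 = [] :=
      PySem.List.pyRange_one_eq_nil (by push_cast; omega)
    rw [hnil]
    simp only [List.foldl_nil]
    refine ⟨by trivial, by intro r _; trivial, hrow, fun hle => absurd hle (by omega)⟩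
  | succ k ih =>
    intro a t ha hak hit hrow
    have hstep : PySem.List.pyRange (a : Int) ((Pc.length : Nat) : Int) 1
        = (a : Int) :: PySem.List.pyRange ((a + 1 : Nat) : Int) ((Pc.length : Nat) : Int) 1 := by
      rw [PySem.List.pyRange_one_cons (by push_cast; omega)]
      congr 1
    -- the value written at column a
    set v : Int :=
      if PySem.List.pyGetD S (i : Int) ' ' = PySem.List.pyGetD Pc ((a : Nat) : Int) ' ' then
        min (PySem.List.pyGetD (PySem.List.pyGetD t ((i : Int) - 1) []) ((a : Nat) : Int) 0)
            (getEndwithDelCnt (PySem.List.slice S none (some (i : Int))) (PySem.List.slice Pc none (some ((a : Nat) : Int))))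
      else PySem.List.pyGetD (PySem.List.pyGetD t ((i : Int) - 1) []) ((a : Nat) : Int) 0 with hv
    have e1 : PySem.List.pySetD t (i : Int) (PySem.List.pySetD (PySem.List.pyGetD t (i : Int) []) ((a : Nat) : Int) v)
        = t.set i ((t.getD i []).set a v) := by
      simp
    rw [hstep, List.foldl_cons]
    rw [show (PySem.List.pySetD t (↑i) (PySem.List.pySetD (PySem.List.pyGetD t ↑i []) (↑a)
      (if PySem.List.pyGetD S (↑i) ' ' = PySem.List.pyGetD Pc (↑a) ' ' then
        min (PySem.List.pyGetD (PySem.List.pyGetD t (↑i - 1) []) (↑a) 0)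
            (getEndwithDelCnt (PySem.List.slice S none (some ↑i)) (PySem.List.slice Pc none (some ↑a)))
      else PySem.List.pyGetD (PySem.List.pyGetD t (↑i - 1) []) (↑a) 0))) = t.set i ((t.getD i []).set a v) from e1]
    have hit' : i < (t.set i ((t.getD i []).set a v)).length := by simpa using hit
    have hrow' : ((t.set i ((t.getD i []).set a v)).getD i []).length = Pc.length := by
      rw [pv_getD_set, if_pos ⟨rfl, hit⟩, List.length_set, hrow]
    obtain ⟨ihl, ihne, ihlen, ihval⟩ := ih (a + 1) (t.set i ((t.getD i []).set a v)) (by omega) (by omega) hit' hrow'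
    refine ⟨by rw [ihl]; simp, ?_, ihlen, ?_⟩
    · intro r hr
      rw [ihne r hr, pv_getD_set, if_neg (by intro hc; exact hr hc.1.symm)]
    · intro hle
      -- helper rewrites for the written value
      have hvv : v = if S.getD i ' ' = Pc.getD a ' '
          then min ((t.getD (i - 1) []).getD a 0) (getEndwithDelCnt (S.take i) (Pc.take a))
          else (t.getD (i - 1) []).getD a 0 := by
        rw [hv]
        have c1 : ((i : Nat) : Int) - 1 = ((i - 1 : Nat) : Int) := by push_cast [hi]; ring
        rw [c1]
        simp only [PySem.List.pyGetD_natCast, PySem.List.slice_to_natCast]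
      by_cases hk : k = 0
      · -- this step wrote the final column a = Pc.length - 1
        subst hk
        have haa : a = Pc.length - 1 := by omega
        have hnil : PySem.List.pyRange ((a + 1 : Nat) : Int) ((Pc.length : Nat) : Int) 1 = [] :=
          PySem.List.pyRange_one_eq_nil (by push_cast; omega)
        rw [hnil]
        simp only [List.foldl_nil]
        have hti : (t.set i ((t.getD i []).set a v)).getD i [] = (t.getD i []).set a v := by
          rw [pv_getD_set]; exact if_pos ⟨rfl, hit⟩
        have htia : ((t.getD i []).set a v).getD (Pc.length - 1) 0 = v := by
          rw [pv_getD_set]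
          exact if_pos ⟨by omega, by rw [hrow]; omega⟩
        rw [hti, htia, hvv, haa]
      · have htail := ihval (by omega)
        have hrr : (t.set i ((t.getD i []).set a v)).getD (i - 1) [] = t.getD (i - 1) [] := by
          rw [pv_getD_set]
          exact if_neg (by omega)
        rw [htail, hrr]

-- A's outer fold: row r of the final table has Tlast r in its last column
theorem pv_outer_fold (S Pc : List Char) (t0 : List (List Int)) (hm : 2 ≤ Pc.length)
    (hlen : t0.length = S.length)
    (hrows : ∀ r : Nat, r < S.length → (t0.getD r []).length = Pc.length)
    (hinit : ∀ r : Nat, r < S.length → (t0.getD r []).getD (Pc.length - 1) 0 = 2 ^ 31) :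
    ∀ (k : Nat), 1 ≤ k → k ≤ S.length →
    (((PySem.List.pyRange 1 (k : Int) 1).foldl (fun t i =>
        (PySem.List.pyRange 1 ((Pc.length : Nat) : Int) 1).foldl
        (fun t j =>
          PySem.List.pySetD t i (PySem.List.pySetD (PySem.List.pyGetD t i []) j
            (if PySem.List.pyGetD S i ' ' = PySem.List.pyGetD Pc j ' ' then
              min (PySem.List.pyGetD (PySem.List.pyGetD t (i - 1) []) j 0)
                  (getEndwithDelCnt (PySem.List.slice S none (some i)) (PySem.List.slice Pc none (some j)))
            else PySem.List.pyGetD (PySem.List.pyGetD t (i - 1) []) j 0))) t) t0).length = S.length) ∧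
    (∀ r : Nat, r < S.length → (((PySem.List.pyRange 1 (k : Int) 1).foldl (fun t i =>
        (PySem.List.pyRange 1 ((Pc.length : Nat) : Int) 1).foldl
        (fun t j =>
          PySem.List.pySetD t i (PySem.List.pySetD (PySem.List.pyGetD t i []) j
            (if PySem.List.pyGetD S i ' ' = PySem.List.pyGetD Pc j ' ' then
              min (PySem.List.pyGetD (PySem.List.pyGetD t (i - 1) []) j 0)
                  (getEndwithDelCnt (PySem.List.slice S none (some i)) (PySem.List.slice Pc none (some j)))
            else PySem.List.pyGetD (PySem.List.pyGetD t (i - 1) []) j 0))) t) t0).getD r []).length = Pc.length) ∧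
    ((((PySem.List.pyRange 1 (k : Int) 1).foldl (fun t i =>
        (PySem.List.pyRange 1 ((Pc.length : Nat) : Int) 1).foldl
        (fun t j =>
          PySem.List.pySetD t i (PySem.List.pySetD (PySem.List.pyGetD t i []) j
            (if PySem.List.pyGetD S i ' ' = PySem.List.pyGetD Pc j ' ' then
              min (PySem.List.pyGetD (PySem.List.pyGetD t (i - 1) []) j 0)
                  (getEndwithDelCnt (PySem.List.slice S none (some i)) (PySem.List.slice Pc none (some j)))
            else PySem.List.pyGetD (PySem.List.pyGetD t (i - 1) []) j 0))) t) t0).getD (k - 1) []).getD (Pc.length - 1) 0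
      = Tlast S Pc (k - 1)) ∧
    (∀ r : Nat, k ≤ r → r < S.length → (((PySem.List.pyRange 1 (k : Int) 1).foldl (fun t i =>
        (PySem.List.pyRange 1 ((Pc.length : Nat) : Int) 1).foldl
        (fun t j =>
          PySem.List.pySetD t i (PySem.List.pySetD (PySem.List.pyGetD t i []) j
            (if PySem.List.pyGetD S i ' ' = PySem.List.pyGetD Pc j ' ' then
              min (PySem.List.pyGetD (PySem.List.pyGetD t (i - 1) []) j 0)
                  (getEndwithDelCnt (PySem.List.slice S none (some i)) (PySem.List.slice Pc none (some j)))
            else PySem.List.pyGetD (PySem.List.pyGetD t (i - 1) []) j 0))) t) t0).getD r []).getD (Pc.length - 1) 0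
      = 2 ^ 31) := by
  intro k hk
  induction k, hk using Nat.le_induction with
  | base =>
    intro hn
    rw [show PySem.List.pyRange (1 : Int) ((1 : Nat) : Int) 1 = [] from
      PySem.List.pyRange_one_eq_nil (by norm_num)]
    simp only [List.foldl_nil]
    exact ⟨hlen, hrows, hinit 0 (by omega), fun r hr hrn => hinit r hrn⟩
  | succ k hk ih =>
    intro hn
    obtain ⟨ihl, ihrows, ihval, ihrest⟩ := ih (by omega)
    have hcast : ((k + 1 : Nat) : Int) = (k : Int) + 1 := by push_cast; ring
    rw [hcast, PySem.List.pyRange_one_succ_right (by exact_mod_cast hk), List.foldl_append,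
      List.foldl_cons, List.foldl_nil]
    obtain ⟨jl, jne, jlen, jval⟩ := pv_inner_fold S Pc k hk (Pc.length - 1) 1 _ (le_refl 1)
      (by omega) (by rw [ihl]; omega) (ihrows k (by omega))
    simp only [Nat.cast_one] at jl jne jlen jval
    refine ⟨by rw [jl, ihl], ?_, ?_, ?_⟩
    · intro r hr
      by_cases hrk : r = k
      · subst hrk; exact jlen
      · rw [jne r hrk]; exact ihrows r hr
    · rw [show k + 1 - 1 = k from rfl]
      rw [jval (by omega)]
      rw [ihval]
      have hged : getEndwithDelCnt (S.take k) (Pc.take (Pc.length - 1))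
          = (Ffun S Pc k (Pc.length - 1)).getD (2 ^ 31) :=
        pv_g_eq S Pc k (Pc.length - 1) (by omega) (by omega)
      rw [hged]
      have hkk : k = (k - 1) + 1 := by omega
      rw [hkk]
      simp only [Tlast]
      norm_num
    · intro r hr hrn
      rw [jne r (by omega)]
      exact ihrest r (by omega) hrn

-- xs[-1] as getD at length-1
theorem pv_pyGetD_neg_one {α : Type} (xs : List α) (h : xs ≠ []) (d : α) :
    PySem.List.pyGetD xs (-1) d = xs.getD (xs.length - 1) d := by
  have h1 : (1 : Nat) ≤ xs.length := by cases xs <;> simp_all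
  rw [PySem.List.pyGetD_neg_ofNat xs 1 d (by omega) (by exact_mod_cast h1)]
  rw [List.getD_eq_getElem?_getD, List.getElem?_eq_getElem (by omega)]
  simp

-- a fold whose step ignores the element is the identity
theorem pv_foldl_id {α β : Type} (l : List β) (t : α) : l.foldl (fun t _ => t) t = t := by
  induction l generalizing t with
  | nil => rfl
  | cons x xs ih => simpa using ih t

-- pv_b_fold, stated in the zeta-reduced form the unfolded port presents
theorem pv_b_fold' (S Pc : List Char) (hm : 1 ≤ Pc.length) (k : Nat) (hk : 1 ≤ k) :
    (PySem.List.pyRange 1 (k : Int) 1).foldl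
      (fun (st : List (Option Int) × Int) i =>
        (some 0 :: List.map (fun jj =>
            if PySem.List.pyGetD S (i - 1) ' ' = Pc.getD jj ' ' then st.1.getD jj none
            else Option.map (fun x => x + 1) (st.1.getD (jj + 1) none)) (List.range (Pc.length - 1)),
         if PySem.List.pyGetD S i ' ' = Pc.getD (Pc.length - 1) ' ' then
           match (some 0 :: List.map (fun jj =>
                if PySem.List.pyGetD S (i - 1) ' ' = Pc.getD jj ' ' then st.1.getD jj none
                else Option.map (fun x => x + 1) (st.1.getD (jj + 1) none)) (List.range (Pc.length - 1))).getD (Pc.length - 1) none with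
           | some v => if v < st.2 then v else st.2
           | none => st.2
         else st.2))
      (some 0 :: List.replicate (Pc.length - 1) none, (2 : Int) ^ 31)
    = ((List.range Pc.length).map (fun j => Ffun S Pc (k - 1) j), Tlast S Pc (k - 1)) :=
  pv_b_fold S Pc hm k hk

theorem pv_main (s p : String) (hs : s.toList ≠ []) (hp : p.toList ≠ []) :
    getLeastCnt s p = getLeastCnt_alt s p := by
  unfold getLeastCnt getLeastCnt_alt
  obtain ⟨c0, P', hP⟩ := List.exists_cons_of_ne_nil hp
  simp only [hP, List.head?_cons]
  set S := s.toList with hS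
  set Pc := c0 :: P' with hPc
  set n := S.length with hn
  have hn1 : 1 ≤ n := by
    rw [hn]; exact List.length_pos_of_ne_nil hs
  have hm1 : 1 ≤ Pc.length := by rw [hPc]; simp
  -- the initial table
  set P0 := List.map (fun _ => List.map (fun _ => (2 : Int) ^ 31) (List.range Pc.length)) (List.range n) with hP0
  have hP0len : P0.length = n := by rw [hP0]; simp
  have hP0row : ∀ r : Nat, r < n → P0.getD r [] = List.map (fun _ => (2 : Int) ^ 31) (List.range Pc.length) := by
    intro r hr
    rw [hP0]
    exact PySem.List.getD_map_range _ _ _ _ hr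
  have hrow0len : (List.map (fun _ => (2 : Int) ^ 31) (List.range Pc.length)).length = Pc.length := by simp
  have hrow0get : ∀ j : Nat, j < Pc.length →
      (List.map (fun _ => (2 : Int) ^ 31) (List.range Pc.length)).getD j 0 = 2 ^ 31 := by
    intro j hj
    exact PySem.List.getD_map_range _ _ _ _ hj
  -- the table after first-column initialisation, in both branches of 'p[0] in s'
  set P1 := if S.contains c0 = true then
      List.foldl (fun t ii => PySem.List.pySetD t ii (PySem.List.pySetD (PySem.List.pyGetD t ii []) 0 0))
        P0 (PySem.List.pyRange (pvFindFirst S c0 : Int) (n : Int) 1)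
    else P0 with hP1
  have hsetD : ∀ row : List Int, PySem.List.pySetD row 0 0 = row.set 0 0 := by
    intro row
    have : ((0 : Nat) : Int) = (0 : Int) := by norm_num
    rw [← this, PySem.List.pySetD_natCast]
  have hP1facts : P1.length = n ∧ ∀ r : Nat, r < n →
      (P1.getD r [] = List.map (fun _ => (2 : Int) ^ 31) (List.range Pc.length) ∨
       P1.getD r [] = (List.map (fun _ => (2 : Int) ^ 31) (List.range Pc.length)).set 0 0) := by
    rw [hP1]
    by_cases hc : S.contains c0
    · rw [if_pos hc]
      have hi0 : pvFindFirst S c0 < n := pv_findFirst_lt S c0 (by simpa using hc)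
      obtain ⟨l1, g1⟩ := pv_col0_fold (n - pvFindFirst S c0) (pvFindFirst S c0) P0
      rw [show pvFindFirst S c0 + (n - pvFindFirst S c0) = n from by omega] at l1 g1
      refine ⟨by rw [l1, hP0len], fun r hr => ?_⟩
      rw [g1 r, hP0row r hr]
      split_ifs
      · right; rw [hsetD]
      · left; rfl
    · rw [if_neg hc]
      exact ⟨hP0len, fun r hr => Or.inl (hP0row r hr)⟩
  have hP1len : P1.length = n := hP1facts.1
  have hP1rowlen : ∀ r : Nat, r < n → (P1.getD r []).length = Pc.length := by
    intro r hr
    rcases hP1facts.2 r hr with h | h <;> rw [h] <;> simp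
  -- the n-1 row, column 0 entry of P1 (used for the lenP = 1 case)
  have hP1row0 : (P1.getD (n - 1) []).getD 0 0 = (if S.contains c0 then 0 else 2 ^ 31) := by
    rw [hP1]
    by_cases hc : S.contains c0
    · rw [if_pos hc, if_pos hc]
      have hi0 : pvFindFirst S c0 < n := pv_findFirst_lt S c0 (by simpa using hc)
      obtain ⟨l1, g1⟩ := pv_col0_fold (n - pvFindFirst S c0) (pvFindFirst S c0) P0
      rw [show pvFindFirst S c0 + (n - pvFindFirst S c0) = n from by omega] at l1 g1
      rw [g1 (n-1), if_pos (by omega), hP0row (n-1) (by omega), hsetD, pv_getD_set,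
        if_pos ⟨rfl, by rw [hrow0len]; omega⟩]
    · rw [if_neg hc, if_neg hc, hP0row (n-1) (by omega)]
      exact hrow0get 0 (by omega)
  by_cases hm2 : 2 ≤ Pc.length
  · -- lenP ≥ 2 : the double loop fills the table; both sides compute Tlast (n-1)
    have hP1last : ∀ r : Nat, r < n → (P1.getD r []).getD (Pc.length - 1) 0 = 2 ^ 31 := by
      intro r hr
      rcases hP1facts.2 r hr with h | h
      · rw [h]; exact hrow0get _ (by omega)
      · rw [h, pv_getD_set, if_neg (by omega)]
        exact hrow0get _ (by omega)
    obtain ⟨ol, orows, oval, _⟩ := pv_outer_fold S Pc P1 hm2 hP1len hP1rowlen hP1last n hn1 (le_refl n)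
    set P2 := (PySem.List.pyRange 1 (n : Int) 1).foldl (fun t i =>
        (PySem.List.pyRange 1 ((Pc.length : Nat) : Int) 1).foldl
        (fun t j =>
          PySem.List.pySetD t i (PySem.List.pySetD (PySem.List.pyGetD t i []) j
            (if PySem.List.pyGetD S i ' ' = PySem.List.pyGetD Pc j ' ' then
              min (PySem.List.pyGetD (PySem.List.pyGetD t (i - 1) []) j 0)
                  (getEndwithDelCnt (PySem.List.slice S none (some i)) (PySem.List.slice Pc none (some j)))
            else PySem.List.pyGetD (PySem.List.pyGetD t (i - 1) []) j 0))) t) P1 with hP2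
    have hlastA : PySem.List.pyGetD (PySem.List.pyGetD P2 (-1) []) (-1) 0 = Tlast S Pc (n - 1) := by
      have h2ne : P2 ≠ [] := List.ne_nil_of_length_pos (by rw [ol]; omega)
      rw [pv_pyGetD_neg_one P2 h2ne []]
      rw [ol]
      have hrne : P2.getD (n - 1) [] ≠ [] :=
        List.ne_nil_of_length_pos (by rw [orows (n-1) (by omega)]; omega)
      rw [pv_pyGetD_neg_one _ hrne 0, orows (n-1) (by omega)]
      exact oval
    rw [hlastA]
    rw [if_neg (show ¬ Pc.length = 1 from by omega)]
    rw [pv_b_fold' S Pc hm1 n hn1]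
  · -- lenP = 1 : the double loop is empty and only the first column matters
    have hm1' : Pc.length = 1 := by omega
    have hinner : PySem.List.pyRange 1 ((Pc.length : Nat) : Int) 1 = [] := by
      rw [hm1']
      exact PySem.List.pyRange_one_eq_nil (by norm_num)
    rw [hinner]
    simp only [List.foldl_nil, pv_foldl_id]
    have hlastA : PySem.List.pyGetD (PySem.List.pyGetD P1 (-1) []) (-1) 0
        = (if S.contains c0 then 0 else 2 ^ 31) := by
      have h1ne : P1 ≠ [] := List.ne_nil_of_length_pos (by rw [hP1len]; omega)
      rw [pv_pyGetD_neg_one P1 h1ne [], hP1len]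
      have hrne : P1.getD (n - 1) [] ≠ [] :=
        List.ne_nil_of_length_pos (by rw [hP1rowlen (n-1) (by omega)]; omega)
      rw [pv_pyGetD_neg_one _ hrne 0, hP1rowlen (n-1) (by omega), hm1']
      exact hP1row0
    rw [hlastA, if_pos hm1']
    have hgd : Pc.getD 0 ' ' = c0 := by rw [hPc]; rfl
    rw [hgd]
    by_cases hc : S.contains c0 = true
    · rw [if_pos hc, if_pos hc]; norm_num
    · rw [if_neg hc, if_neg hc]; norm_num

theorem getLeastCnt_spec : Claim_equal_getLeastCnt := by
  intro s p _ hpre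
  exact pv_main s p hpre.1 hpre.2
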